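-- pv_equiv track=rewrite | github.com/sphinx-contrib/sphinx-lint | sphinxlint.py | paragraphs
-- ===== SOURCE A (Python) =====
-- def paragraphs(lines):
--     """Yield (paragraph_line_no, paragraph_text) pairs describing
--     paragraphs of the given lines.
--     """
--     paragraph = []
--     paragraph_lno = 1
--     for lno, line in enumerate(lines, start=1):
--         if line != "\n":
--             paragraph.append(line)
--         elif paragraph:
--             yield paragraph_lno, "".join(paragraph)
--             paragraph = []
--             paragraph_lno = lno
--     if paragraph:
--         yield paragraph_lno, "".join(paragraph)
-- ===== SOURCE B (Python) =====
-- def paragraphs(lines):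
--     """Yield (paragraph_line_no, paragraph_text) pairs describing
--     paragraphs of the given lines.
--     """
--     lines = list(lines)
--     n = len(lines)
--     i = 0
--     report = 1
--     while i < n:
--         blank = lines[i] == "\n"
--         j = i
--         while j < n and (lines[j] == "\n") == blank:
--             j += 1
--         if blank:
--             report = i + 1
--         else:
--             yield report, "".join(lines[i:j])
--         i = j
-- ===== Notes on version B (the rewrite author's own statement) =====
-- stated objective: alternative
-- what changed: B iterates over maximal runs of blank/non-blank lines with a two-index scan (run grouping), yielding one pair per content run and updating the reported line number at each blank run's start, instead of A's line-by-line accumulator that flushes on blank lines.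
import Mathlib
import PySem

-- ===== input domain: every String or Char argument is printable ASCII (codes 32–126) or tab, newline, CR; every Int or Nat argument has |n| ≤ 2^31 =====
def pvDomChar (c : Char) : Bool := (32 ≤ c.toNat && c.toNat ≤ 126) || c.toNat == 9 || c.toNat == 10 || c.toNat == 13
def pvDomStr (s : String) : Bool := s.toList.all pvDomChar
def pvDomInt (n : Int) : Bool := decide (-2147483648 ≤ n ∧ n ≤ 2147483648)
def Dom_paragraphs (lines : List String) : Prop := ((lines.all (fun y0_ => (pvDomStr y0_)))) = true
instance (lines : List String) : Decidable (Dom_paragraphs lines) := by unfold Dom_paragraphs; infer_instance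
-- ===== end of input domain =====

-- B replaces A's line-by-line accumulator (flush on blank) with a run-grouping scan over maximal
-- blank/non-blank runs; same cost, different decomposition (objective: alternative).

-- ===== PORT A =====
-- A's loop: state (paragraph, paragraph_lno), 1-based line counter; yield → cons.
def paragraphsGo : List String → Int → List String → Int → List (Int × String)
  | [], _, para, plno => if para ≠ [] then [(plno, PySem.Str.join "" para)] else []
  | line :: rest, lno, para, plno =>
    if line ≠ "\n" then paragraphsGo rest (lno + 1) (para ++ [line]) plno
    else if para ≠ [] then (plno, PySem.Str.join "" para) :: paragraphsGo rest (lno + 1) [] lno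
    else paragraphsGo rest (lno + 1) para plno

def paragraphs (lines : List String) : List (Int × String) :=
  paragraphsGo lines 1 [] 1

-- ===== PORT B =====
-- B's loop: consume one maximal run (head + takeWhile of same blankness) per step;
-- blank run updates the reported line number, content run yields one pair.
def paragraphsAltGo : List String → Int → Int → List (Int × String)
  | [], _, _ => []
  | l :: ls, lno, report =>
    if l == "\n" then
      paragraphsAltGo (List.dropWhile (fun x => x == "\n") ls)
        (lno + 1 + ((List.takeWhile (fun x => x == "\n") ls).length : Int)) lno
    else
      (report, PySem.Str.join "" (l :: List.takeWhile (fun x => !(x == "\n")) ls)) ::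
      paragraphsAltGo (List.dropWhile (fun x => !(x == "\n")) ls)
        (lno + 1 + ((List.takeWhile (fun x => !(x == "\n")) ls).length : Int)) report
termination_by ls _ _ => ls.length
decreasing_by
  · have := List.length_dropWhile_le (p := fun x => x == "\n") (l := ls)
    simp; omega
  · have := List.length_dropWhile_le (p := fun x => !(x == "\n")) (l := ls)
    simp; omega

def paragraphs_alt (lines : List String) : List (Int × String) :=
  paragraphsAltGo lines 1 1

-- ===== PRECONDITION & SPEC =====
def Spec_paragraphs (lines : List String) (out : List (Int × String)) : Prop := out = paragraphs_alt lines
instance (lines : List String) (out : List (Int × String)) : Decidable (Spec_paragraphs lines out) := by unfold Spec_paragraphs; infer_instance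

-- ===== CLAIM (what is proved, stated in full; the proofs are below) =====
def Claim_equal_paragraphs : Prop := ∀ (lines : List String), Dom_paragraphs lines → Spec_paragraphs lines (paragraphs lines)

-- ===== LEMMAS AND PROOFS =====

-- A's loop skips a prefix of blank lines when the pending paragraph is empty.
theorem paragraphsGo_blank_prefix (ls : List String) : ∀ (lno r : Int),
    paragraphsGo ls lno [] r =
      paragraphsGo (ls.dropWhile (fun x => x == "\n")) (lno + ((ls.takeWhile (fun x => x == "\n")).length : Int)) [] r := by
  induction ls with
  | nil => intro lno r; simp
  | cons l t ih =>
    intro lno r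
    by_cases h : l = "\n"
    · subst h
      have hd : List.dropWhile (fun x => x == "\n") ("\n" :: t) = List.dropWhile (fun x => x == "\n") t := by
        simp
      have ht : List.takeWhile (fun x => x == "\n") ("\n" :: t) = "\n" :: List.takeWhile (fun x => x == "\n") t := by
        simp
      rw [hd, ht]
      simp only [paragraphsGo]
      rw [if_neg (by simp), if_neg (by simp), ih]
      congr 1
      simp only [List.length_cons]
      push_cast
      ring
    · have hd : List.dropWhile (fun x => x == "\n") (l :: t) = l :: t := by
        simp [h]
      have ht : List.takeWhile (fun x => x == "\n") (l :: t) = [] := by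
        simp [h]
      rw [hd, ht]
      simp

-- A's loop accumulates a prefix of non-blank lines into the pending paragraph.
theorem paragraphsGo_content_prefix (ls : List String) : ∀ (lno r : Int) (para : List String),
    paragraphsGo ls lno para r =
      paragraphsGo (ls.dropWhile (fun x => !(x == "\n"))) (lno + ((ls.takeWhile (fun x => !(x == "\n"))).length : Int))
        (para ++ ls.takeWhile (fun x => !(x == "\n"))) r := by
  induction ls with
  | nil => intro lno r para; simp
  | cons l t ih =>
    intro lno r para
    by_cases h : l = "\n"
    · subst h
      simp
    · have hd : List.dropWhile (fun x => !(x == "\n")) (l :: t) = List.dropWhile (fun x => !(x == "\n")) t := by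
        simp [h]
      have ht : List.takeWhile (fun x => !(x == "\n")) (l :: t) = l :: List.takeWhile (fun x => !(x == "\n")) t := by
        simp [h]
      rw [hd, ht]
      simp only [paragraphsGo]
      rw [if_pos h, ih]
      congr 1
      · simp only [List.length_cons]; push_cast; ring
      · simp

theorem head_dropWhile_false {α : Type} (p : α → Bool) (ls : List α) (x : α)
    (h : (ls.dropWhile p).head? = some x) : p x = false := by
  induction ls with
  | nil => simp at h
  | cons l t ih =>
    by_cases hp : p l = true
    · rw [List.dropWhile_cons, if_pos hp] at h; exact ih h
    · rw [List.dropWhile_cons, if_neg hp] at h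
      simp only [List.head?_cons, Option.some.injEq] at h
      subst h
      exact Bool.eq_false_iff.mpr hp

theorem paragraphsGo_eq_alt (n : Nat) : ∀ (ls : List String), ls.length ≤ n → ∀ (lno r : Int),
    (ls.head? = some "\n" → r = lno) →
    paragraphsGo ls lno [] r = paragraphsAltGo ls lno r := by
  induction n with
  | zero =>
    intro ls h lno r _
    have : ls = [] := by cases ls <;> simp_all
    subst this; simp [paragraphsGo, paragraphsAltGo]
  | succ n ih =>
    intro ls hlen lno r hr
    cases ls with
    | nil => simp [paragraphsGo, paragraphsAltGo]
    | cons l t =>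
      by_cases hb : l = "\n"
      · -- blank run: both skip it; A keeps r, which equals the run's start lno.
        subst hb
        have hrl : r = lno := hr rfl
        subst hrl
        rw [paragraphsGo_blank_prefix]
        have hd : List.dropWhile (fun x => x == "\n") ("\n" :: t) = List.dropWhile (fun x => x == "\n") t := by
          simp
        have ht : List.takeWhile (fun x => x == "\n") ("\n" :: t) = "\n" :: List.takeWhile (fun x => x == "\n") t := by
          simp
        rw [hd, ht]
        simp only [paragraphsAltGo]
        rw [if_pos (by simp)]
        have hlen' : (t.dropWhile (fun x => x == "\n")).length ≤ n := by
          have h1 := List.length_dropWhile_le (fun x => x == ("\n" : String)) t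
          simp at hlen; omega
        have harg : r + ((("\n" :: t.takeWhile (fun x => x == "\n")).length : Nat) : Int) =
            r + 1 + ((t.takeWhile (fun x => x == "\n")).length : Int) := by
          simp only [List.length_cons]; push_cast; ring
        rw [harg]
        exact ih _ hlen' _ _ (by
          intro hhd
          exfalso
          have := head_dropWhile_false (fun x => x == "\n") t _ hhd
          simp at this)
      · -- content run: A accumulates then flushes; B yields the run directly.
        rw [paragraphsGo_content_prefix]
        have hd : List.dropWhile (fun x => !(x == "\n")) (l :: t) = List.dropWhile (fun x => !(x == "\n")) t := by
          simp [hb]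
        have ht : List.takeWhile (fun x => !(x == "\n")) (l :: t) = l :: List.takeWhile (fun x => !(x == "\n")) t := by
          simp [hb]
        rw [hd, ht, List.nil_append]
        simp only [paragraphsAltGo]
        rw [if_neg (by simp [hb])]
        have harg : lno + (((l :: t.takeWhile (fun x => !(x == "\n"))).length : Nat) : Int) =
            lno + 1 + ((t.takeWhile (fun x => !(x == "\n"))).length : Int) := by
          simp only [List.length_cons]; push_cast; ring
        rw [harg]
        have hrestlen : (t.dropWhile (fun x => !(x == "\n"))).length ≤ t.length :=
          List.length_dropWhile_le _ t
        cases hcase : t.dropWhile (fun x => !(x == "\n")) with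
        | nil =>
          simp only [paragraphsGo, paragraphsAltGo]
          rw [if_pos (by simp)]
        | cons x t2 =>
          have hx : x = "\n" := by
            have := head_dropWhile_false (fun x => !(x == "\n")) t x (by rw [hcase]; rfl)
            simpa using this
          subst hx
          simp only [paragraphsGo]
          rw [if_neg (by simp), if_pos (by simp)]
          congr 1
          -- A after the flush skips the rest of the blank run; B's next step does the same.
          rw [paragraphsGo_blank_prefix]
          simp only [paragraphsAltGo]
          rw [if_pos (by simp)]
          have hlen2 : (t2.dropWhile (fun x => x == "\n")).length ≤ n := by
            have h1 := List.length_dropWhile_le (fun x => x == ("\n" : String)) t2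
            have h2 : t2.length < t.length := by
              have h3 : ("\n" :: t2).length ≤ t.length := by rw [← hcase]; exact hrestlen
              simp at h3; omega
            simp at hlen; omega
          rw [ih _ hlen2 _ _ (by
            intro hhd
            exfalso
            have := head_dropWhile_false (fun x => x == "\n") t2 _ hhd
            simp at this)]

-- ===== VERDICT (by name: the statement is the Claim_ definition above) =====
theorem paragraphs_spec : Claim_equal_paragraphs := by
  intro lines _
  unfold Spec_paragraphs paragraphs paragraphs_alt
  exact paragraphsGo_eq_alt lines.length lines le_rfl 1 1 (fun _ => rfl)
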